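-- pv_equiv track=rewrite | github.com/MatiasArregui/matias_tecnicatura | tercnicatura/primer año/Guia 9/Ejercicio2.py | Contador5
-- ===== SOURCE A (Python) =====
-- def Contador5(texto):
--     palabras=[]
--     cont=0
--     for x in texto:
--         if x.isalnum() or x.isdigit():
--             cont+=1
--         if x == " " or x =="." or x == ",":
--             if cont>=5:
--                 palabras.append(cont)
--             cont=0
--     return len(palabras)
-- ===== SOURCE B (Python) =====
-- def Contador5(texto):
--     # split-then-tally: materialize the delimiter-separated segments, then
--     # count the segments (excluding the unterminated final one) whose
--     # alphanumeric-character tally is at least 5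
--     segs = [[]]
--     for c in texto:
--         if c in " .,":
--             segs.append([])
--         else:
--             segs[-1].append(c)
--     return sum(sum(map(str.isalnum, seg)) >= 5 for seg in segs[:-1])
-- ===== Notes on version B (the rewrite author's own statement) =====
-- stated objective: alternative
-- what changed: B materializes the delimiter-separated segments in one pass and then tallies alphanumeric characters per segment, instead of A's running counter that is tested and reset at every delimiter (and A's redundant isalnum-or-isdigit test).
import Mathlib
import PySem

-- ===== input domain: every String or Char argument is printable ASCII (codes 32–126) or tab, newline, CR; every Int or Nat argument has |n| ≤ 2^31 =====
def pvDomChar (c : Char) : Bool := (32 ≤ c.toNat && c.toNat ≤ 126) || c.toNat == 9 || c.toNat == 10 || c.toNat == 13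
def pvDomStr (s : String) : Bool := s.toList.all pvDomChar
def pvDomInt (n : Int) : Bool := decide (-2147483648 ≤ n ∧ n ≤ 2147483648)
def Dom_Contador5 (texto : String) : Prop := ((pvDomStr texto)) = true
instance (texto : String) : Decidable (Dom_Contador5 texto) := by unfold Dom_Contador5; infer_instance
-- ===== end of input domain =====

-- B is an alternative decomposition: it materializes the segments, then tallies each;
-- equal return value to A on every input (proved below).

-- ===== PORT A =====
-- one iteration of A's for-loop: state = (palabras, cont)
def pvStepA (st : List Int × Int) (x : Char) : List Int × Int :=
  let cont := if PySem.Chars.isalnum x || PySem.Chars.isdigit x then st.2 + 1 else st.2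
  if x = ' ' ∨ x = '.' ∨ x = ',' then
    ((if cont ≥ 5 then st.1 ++ [cont] else st.1), 0)
  else (st.1, cont)

def Contador5 (texto : String) : Int :=
  ((texto.toList.foldl pvStepA ([], 0)).1.length : Int)

-- ===== PORT B =====
-- one iteration of B's for-loop: segs[-1].append(c) / segs.append([])
def pvStepB (segs : List (List Char)) (c : Char) : List (List Char) :=
  if c = ' ' ∨ c = '.' ∨ c = ',' then segs ++ [[]]
  else segs.dropLast ++ [segs.getLastD [] ++ [c]]

def Contador5_alt (texto : String) : Int :=
  let segs := texto.toList.foldl pvStepB [[]]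
  (((segs.dropLast).filter (fun seg => 5 ≤ (seg.filter PySem.Chars.isalnum).length)).length : Int)

-- ===== PRECONDITION & SPEC =====
def Spec_Contador5 (texto : String) (out : Int) : Prop := out = Contador5_alt texto
instance (texto : String) (out : Int) : Decidable (Spec_Contador5 texto out) := by unfold Spec_Contador5; infer_instance

-- ===== CLAIM (what is proved, stated in full; the proofs are below) =====
def Claim_equal_Contador5 : Prop := ∀ (texto : String), Dom_Contador5 texto → Spec_Contador5 texto (Contador5 texto)

-- ===== LEMMAS AND PROOFS =====

-- the common abstraction: number of finished ≥5-alnum segments in l, given cont alnums already in the current segment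
def pvG (cont : Int) : List Char → Nat
  | [] => 0
  | c :: cs =>
    let cont' := if PySem.Chars.isalnum c || PySem.Chars.isdigit c then cont + 1 else cont
    if c = ' ' ∨ c = '.' ∨ c = ',' then (if cont' ≥ 5 then 1 else 0) + pvG 0 cs
    else pvG cont' cs

theorem pvGetLastD_append {α : Type} (l : List α) (a d : α) : (l ++ [a]).getLastD d = a :=
  List.getLastD_concat

theorem pvDropLast_append {α : Type} (l : List α) (a : α) : (l ++ [a]).dropLast = l :=
  List.dropLast_concat

def pvGood (ss : List (List Char)) : Nat :=
  (ss.filter (fun seg => 5 ≤ (seg.filter PySem.Chars.isalnum).length)).length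

theorem pvA_foldl (l : List Char) : ∀ (palabras : List Int) (cont : Int),
    (l.foldl pvStepA (palabras, cont)).1.length = palabras.length + pvG cont l := by
  induction l with
  | nil => intro p c; simp [pvG]
  | cons x xs ih =>
    intro p c
    simp only [List.foldl_cons, pvStepA, pvG]
    by_cases hd : x = ' ' ∨ x = '.' ∨ x = ','
    · simp only [hd, if_pos]
      rw [ih]
      split_ifs <;> simp <;> omega
    · simp [hd, ih]

theorem pvAlnum_or_digit (c : Char) :
    (PySem.Chars.isalnum c || PySem.Chars.isdigit c) = PySem.Chars.isalnum c := by
  simp only [PySem.Chars.isalnum, PySem.Chars.isdigit]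
  cases h1 : PySem.Chars.isalpha c <;> cases h2 : decide ('0' ≤ c ∧ c ≤ '9') <;> simp

theorem pvGood_append_singleton (ss : List (List Char)) (s : List Char) :
    pvGood (ss ++ [s]) =
      pvGood ss + (if 5 ≤ (s.filter PySem.Chars.isalnum).length then 1 else 0) := by
  simp only [pvGood, List.filter_append, List.length_append]
  split_ifs with h <;> simp [List.filter, h]

theorem pvB_foldl (l : List Char) : ∀ (segs : List (List Char)) (h : segs ≠ []),
    (l.foldl pvStepB segs) ≠ [] ∧
    pvGood (l.foldl pvStepB segs).dropLast =
      pvGood segs.dropLast + pvG (((segs.getLastD []).filter PySem.Chars.isalnum).length : Int) l := by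
  induction l with
  | nil => intro segs h; simp [pvG, h]
  | cons c cs ih =>
    intro segs h
    simp only [List.foldl_cons, pvStepB, pvG]
    by_cases hd : c = ' ' ∨ c = '.' ∨ c = ','
    · have hna : PySem.Chars.isalnum c = false := by
        rcases hd with h1 | h1 | h1 <;> subst h1 <;> decide
      have hnd : PySem.Chars.isdigit c = false := by
        rcases hd with h1 | h1 | h1 <;> subst h1 <;> decide
      simp only [hd, if_pos, hna, hnd, Bool.or_self]
      obtain ⟨hne, heq⟩ := ih (segs ++ [[]]) (by simp)
      refine ⟨hne, ?_⟩
      have hsplit : segs = segs.dropLast ++ [segs.getLastD []] := by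
        rcases List.eq_nil_or_concat segs with h' | ⟨ys, y, h'⟩
        · exact absurd h' h
        · subst h'; simp
      rw [heq, pvGetLastD_append, pvDropLast_append]
      simp only [List.filter_nil, List.length_nil, Nat.cast_zero, Bool.false_eq_true,
        if_false]
      conv_lhs => rw [hsplit]
      rw [pvGood_append_singleton]
      split_ifs with h1 h2 <;> omega
    · simp only [hd, if_false]
      obtain ⟨hne, heq⟩ := ih (segs.dropLast ++ [segs.getLastD [] ++ [c]]) (by simp)
      refine ⟨hne, ?_⟩
      rw [heq]
      simp only [pvGetLastD_append, pvDropLast_append, List.filter_append, List.length_append]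
      rw [pvAlnum_or_digit]
      by_cases ha : PySem.Chars.isalnum c = true
      · simp [ha]
      · simp [Bool.not_eq_true] at ha
        simp [ha]

-- ===== VERDICT (by name: the statement is the Claim_ definition above) =====
theorem Contador5_spec : Claim_equal_Contador5 := by
  intro texto _
  unfold Spec_Contador5 Contador5 Contador5_alt
  rw [pvA_foldl]
  obtain ⟨_, heq⟩ := pvB_foldl texto.toList [[]] (by simp)
  have : pvGood ((texto.toList.foldl pvStepB [[]]).dropLast) = pvG 0 texto.toList := by
    rw [heq]; simp [pvGood]
  simp only [List.length_nil, Nat.zero_add]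
  rw [show (((texto.toList.foldl pvStepB [[]]).dropLast.filter
      (fun seg => 5 ≤ (seg.filter PySem.Chars.isalnum).length)).length) =
      pvGood ((texto.toList.foldl pvStepB [[]]).dropLast) from rfl, this]
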